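-- pv_equiv track=rewrite | github.com/nen9mA0/Instruction-Generator | myInsGen/encoder/PredictAssembly.py | ExpandHash
-- ===== SOURCE A (Python) =====
-- def ExpandHash(myhash, hash_tmp=None):    # hash_tmp for speed
--     if " " in myhash:
--         return []
--     if hash_tmp and myhash in hash_tmp:
--         return hash_tmp[myhash]
--
--     num_lst = []
--     mask = 0
--     masked_value = 0
--     for i in range(len(myhash)):    # for every hash, generate a mask and a masked_value
--                                     # when hash[i] is a determined number, the corresponding mask bit must be 1, masked_value is hash[i] itself
--                                     # and for not determined number, mask bit is 0, masked_value can be 0 or 1 (because it make no sense), but we set it 0 here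
--         mask = mask << 1
--         masked_value = masked_value << 1
--         if myhash[i] == "0":
--             mask |= 1
--         elif myhash[i] == "1":
--             mask |= 1
--             masked_value |= 1
--     if hash_tmp:
--         hash_tmp[myhash] = []
--     for num in range(256):
--         if num & mask == masked_value:
--             num_lst.append(num)
--             if hash_tmp:
--                 hash_tmp[myhash].append(num)
--     return num_lst
-- ===== SOURCE B (Python) =====
-- def ExpandHash(myhash, hash_tmp=None):
--     if " " in myhash:
--         return []
--     if hash_tmp and myhash in hash_tmp:
--         return hash_tmp[myhash]
--     n = len(myhash)
--     # a fixed '1' above bit 7 can never be matched by a value < 256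
--     if any(myhash[i] == "1" and n - 1 - i >= 8 for i in range(n)):
--         vals = []
--     else:
--         # expand bit 7 down to bit 0, branching on each free bit: ascending by construction
--         vals = [0]
--         for b in range(7, -1, -1):
--             i = n - 1 - b
--             c = myhash[i] if 0 <= i < n else None
--             if c == "0":
--                 vals = [2 * x for x in vals]
--             elif c == "1":
--                 vals = [2 * x + 1 for x in vals]
--             else:
--                 vals = [y for x in vals for y in (2 * x, 2 * x + 1)]
--     if hash_tmp:
--         hash_tmp[myhash] = list(vals)
--     return vals
-- ===== Notes on version B (the rewrite author's own statement) =====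
-- stated objective: alternative
-- what changed: Instead of testing every value 0..255 against the mask/masked_value derived from the pattern, B reads the per-bit constraints directly and expands only the matching values by branching on each free bit from bit 7 down to bit 0 (returning empty early when a '1' is fixed above bit 7), producing the same ascending list without the 256-candidate scan.
import Mathlib
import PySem

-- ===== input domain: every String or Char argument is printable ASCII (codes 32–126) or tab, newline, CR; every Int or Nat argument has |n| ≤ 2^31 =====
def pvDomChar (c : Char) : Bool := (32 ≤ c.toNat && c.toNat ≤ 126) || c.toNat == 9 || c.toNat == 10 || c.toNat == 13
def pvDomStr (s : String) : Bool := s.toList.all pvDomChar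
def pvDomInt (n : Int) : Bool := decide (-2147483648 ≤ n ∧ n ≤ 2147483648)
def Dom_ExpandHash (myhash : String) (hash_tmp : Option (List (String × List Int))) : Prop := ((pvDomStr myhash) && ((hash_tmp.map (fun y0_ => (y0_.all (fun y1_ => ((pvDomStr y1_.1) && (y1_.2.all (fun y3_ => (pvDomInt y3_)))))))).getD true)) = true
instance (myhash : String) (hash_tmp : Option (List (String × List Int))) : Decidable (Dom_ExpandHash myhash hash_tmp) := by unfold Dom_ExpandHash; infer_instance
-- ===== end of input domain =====

-- B replaces A's test of all 256 candidate values by a bitwise expansion that only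
-- generates the matching values (MSB-to-LSB branching on the free bits of the pattern).
-- NOTE: Python A mutates hash_tmp (writes the computed list into the cache); the
-- equivalence proved here is about the RETURN value only (B performs the same mutation).

-- ===== PORT A =====
def maskStepA (p : Int × Int) (c : Char) : Int × Int :=
  let mask := p.1 <<< (1 : Nat)
  let mv := p.2 <<< (1 : Nat)
  if c = '0' then (PySem.Int.bor mask 1, mv)
  else if c = '1' then (PySem.Int.bor mask 1, PySem.Int.bor mv 1)
  else (mask, mv)

def ExpandHashCore (myhash : String) : List Int :=
  let mm := myhash.toList.foldl maskStepA (0, 0)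
  (PySem.List.pyRange 0 256 1).foldl
    (fun acc num => if PySem.Int.band num mm.1 = mm.2 then acc ++ [num] else acc) []

def ExpandHash (myhash : String) (hash_tmp : Option (List (String × List Int))) : List Int :=
  if PySem.Str.isIn " " myhash then []
  else
    match hash_tmp with
    | some d =>
      if d.isEmpty then ExpandHashCore myhash
      else
        match List.lookup myhash d with
        | some v => v
        | none => ExpandHashCore myhash
    | none => ExpandHashCore myhash

-- ===== PORT B =====
def altStep (c : Option Char) (vals : List Int) : List Int :=
  if c = some '0' then vals.map (fun x => 2 * x)
  else if c = some '1' then vals.map (fun x => 2 * x + 1)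
  else vals.flatMap (fun x => [2 * x, 2 * x + 1])

def altCharAt (s : List Char) (i : Int) : Option Char :=
  if 0 ≤ i ∧ i < (s.length : Int) then s[i.toNat]? else none

def ExpandHashAltCore (myhash : String) : List Int :=
  let s := myhash.toList
  let n : Int := s.length
  if (List.range s.length).any (fun i => (s.getD i ' ' == '1') && decide ((8 : Int) ≤ n - 1 - i)) then
    []
  else
    (PySem.List.pyRange 7 (-1) (-1)).foldl (fun vals b => altStep (altCharAt s (n - 1 - b)) vals) [0]

def ExpandHash_alt (myhash : String) (hash_tmp : Option (List (String × List Int))) : List Int :=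
  if PySem.Str.isIn " " myhash then []
  else
    match hash_tmp with
    | some d =>
      if d.isEmpty then ExpandHashAltCore myhash
      else
        match List.lookup myhash d with
        | some v => v
        | none => ExpandHashAltCore myhash
    | none => ExpandHashAltCore myhash

-- ===== PRECONDITION & SPEC =====
def Spec_ExpandHash (myhash : String) (hash_tmp : Option (List (String × List Int))) (out : List Int) : Prop := out = ExpandHash_alt myhash hash_tmp
instance (myhash : String) (hash_tmp : Option (List (String × List Int))) (out : List Int) : Decidable (Spec_ExpandHash myhash hash_tmp out) := by unfold Spec_ExpandHash; infer_instance

-- ===== CLAIM (what is proved, stated in full; the proofs are below) =====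
def Claim_equal_ExpandHash : Prop := ∀ (myhash : String) (hash_tmp : Option (List (String × List Int))), Dom_ExpandHash myhash hash_tmp → Spec_ExpandHash myhash hash_tmp (ExpandHash myhash hash_tmp)

-- ===== LEMMAS AND PROOFS =====

-- Nat mirror of A's mask/masked_value accumulator
def natStep (p : Nat × Nat) (c : Char) : Nat × Nat :=
  let mask := p.1 <<< 1
  let mv := p.2 <<< 1
  if c = '0' then (mask ||| 1, mv)
  else if c = '1' then (mask ||| 1, mv ||| 1)
  else (mask, mv)

def natMM (s : List Char) : Nat × Nat := s.foldl natStep (0, 0)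

-- per-bit match of a candidate bit against the pattern constraint (non-'0'/'1' chars and
-- positions outside the pattern are free)
def matchB (bit : Bool) (c : Option Char) : Bool :=
  if c = some '0' then !bit else if c = some '1' then bit else true

-- Nat mirror of B's expansion step
def stepN (c : Option Char) (l : List Nat) : List Nat :=
  if c = some '0' then l.map (fun x => 2 * x)
  else if c = some '1' then l.map (fun x => 2 * x + 1)
  else l.flatMap (fun x => [2 * x, 2 * x + 1])

-- B's expansion after j steps (bits 7 down to 8-j processed)
def expN (g : Nat → Option Char) : Nat → List Nat
  | 0 => [0]
  | j + 1 => stepN (g (7 - j)) (expN g j)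

lemma foldA_cast (s : List Char) (m v : Nat) :
    s.foldl maskStepA ((m : Int), (v : Int)) =
      (((s.foldl natStep (m, v)).1 : Int), ((s.foldl natStep (m, v)).2 : Int)) := by
  induction s generalizing m v with
  | nil => rfl
  | cons c t ih =>
    simp only [List.foldl_cons]
    have hm : ((m : Int) <<< (1 : Nat)) = ((m <<< 1 : Nat) : Int) := by
      simp [Int.shiftLeft_eq, Nat.shiftLeft_eq]
    have hv : ((v : Int) <<< (1 : Nat)) = ((v <<< 1 : Nat) : Int) := by
      simp [Int.shiftLeft_eq, Nat.shiftLeft_eq]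
    by_cases h0 : c = '0'
    · simp only [maskStepA, natStep, h0, if_pos, hm, hv]
      rw [show (1 : Int) = ((1 : Nat) : Int) by rfl, PySem.Int.bor_natCast]
      exact ih _ _
    · by_cases h1 : c = '1'
      · simp only [maskStepA, natStep, h1, hm, hv]
        rw [show (1 : Int) = ((1 : Nat) : Int) by rfl, PySem.Int.bor_natCast, PySem.Int.bor_natCast]
        exact ih _ _
      · simp only [maskStepA, natStep, h0, h1, hm, hv]
        exact ih _ _

lemma testBit_one_succ (b : Nat) : Nat.testBit 1 (b + 1) = false := by
  simp [Nat.testBit_succ]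

lemma shl1_testBit_zero (m : Nat) : (m <<< 1).testBit 0 = false := by
  rw [Nat.testBit_shiftLeft]; simp

lemma shl1_testBit_succ (m b : Nat) : (m <<< 1).testBit (b + 1) = m.testBit b := by
  rw [Nat.testBit_shiftLeft]; simp

lemma shl1_or1_testBit_zero (m : Nat) : (m <<< 1 ||| 1).testBit 0 = true := by
  rw [Nat.testBit_or, shl1_testBit_zero]; rfl

lemma shl1_or1_testBit_succ (m b : Nat) : (m <<< 1 ||| 1).testBit (b + 1) = m.testBit b := by
  rw [Nat.testBit_or, shl1_testBit_succ, testBit_one_succ]; simp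

lemma natMM_testBit (s : List Char) (b : Nat) :
    (natMM s).1.testBit b = ((s.reverse[b]? == some '0') || (s.reverse[b]? == some '1')) ∧
      (natMM s).2.testBit b = (s.reverse[b]? == some '1') := by
  induction s using List.reverseRecOn generalizing b with
  | nil => simp [natMM]
  | append_singleton t c ih =>
    have hfold : natMM (t ++ [c]) = natStep (natMM t) c := by
      simp [natMM, List.foldl_append]
    have hrev : (t ++ [c]).reverse = c :: t.reverse := by simp
    rw [hfold, hrev]
    by_cases h0 : c = '0'
    · subst h0
      have hstep : natStep (natMM t) '0' = ((natMM t).1 <<< 1 ||| 1, (natMM t).2 <<< 1) := by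
        simp [natStep]
      rw [hstep]
      cases b with
      | zero =>
        rw [List.getElem?_cons_zero]
        exact ⟨by rw [shl1_or1_testBit_zero]; rfl, by rw [shl1_testBit_zero]; rfl⟩
      | succ b =>
        rw [List.getElem?_cons_succ]
        exact ⟨by rw [shl1_or1_testBit_succ]; exact (ih b).1,
               by rw [shl1_testBit_succ]; exact (ih b).2⟩
    · by_cases h1 : c = '1'
      · subst h1
        have hstep : natStep (natMM t) '1' = ((natMM t).1 <<< 1 ||| 1, (natMM t).2 <<< 1 ||| 1) := by
          simp [natStep]
        rw [hstep]
        cases b with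
        | zero =>
          rw [List.getElem?_cons_zero]
          exact ⟨by rw [shl1_or1_testBit_zero]; rfl, by rw [shl1_or1_testBit_zero]; rfl⟩
        | succ b =>
          rw [List.getElem?_cons_succ]
          exact ⟨by rw [shl1_or1_testBit_succ]; exact (ih b).1,
                 by rw [shl1_or1_testBit_succ]; exact (ih b).2⟩
      · have hstep : natStep (natMM t) c = ((natMM t).1 <<< 1, (natMM t).2 <<< 1) := by
          simp [natStep, h0, h1]
        rw [hstep]
        have e0 : (c == '0') = false := by simp [h0]
        have e1 : (c == '1') = false := by simp [h1]
        cases b with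
        | zero =>
          rw [List.getElem?_cons_zero]
          constructor
          · rw [shl1_testBit_zero]; simp [e0, e1]
          · rw [shl1_testBit_zero]; simp [e1]
        | succ b =>
          rw [List.getElem?_cons_succ]
          exact ⟨by rw [shl1_testBit_succ]; exact (ih b).1,
                 by rw [shl1_testBit_succ]; exact (ih b).2⟩

lemma predA_iff (s : List Char) (num : Nat) (h : num < 256) :
    (num &&& (natMM s).1 = (natMM s).2) ↔
      ((∀ b, 8 ≤ b → s.reverse[b]? ≠ some '1') ∧
        ∀ t, t < 8 → matchB (num.testBit t) (s.reverse[t]?) = true) := by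
  have hext : (num &&& (natMM s).1 = (natMM s).2) ↔
      ∀ b, (num.testBit b && (natMM s).1.testBit b) = (natMM s).2.testBit b := by
    constructor
    · intro hh b; rw [← Nat.testBit_and, hh]
    · intro hh; exact Nat.eq_of_testBit_eq (fun b => by rw [Nat.testBit_and]; exact hh b)
  have hhigh : ∀ b, 8 ≤ b → num.testBit b = false := by
    intro b hb
    exact Nat.testBit_lt_two_pow (lt_of_lt_of_le h (by calc (256:Nat) = 2^8 := by norm_num
                                                        _ ≤ 2^b := Nat.pow_le_pow_right (by norm_num) hb))
  rw [hext]
  constructor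
  · intro hh
    constructor
    · intro b hb hcon
      have := hh b
      rw [hhigh b hb, (natMM_testBit s b).2, hcon] at this
      simp at this
    · intro t _
      have := hh t
      rw [(natMM_testBit s t).1, (natMM_testBit s t).2] at this
      rcases ho : s.reverse[t]? with _ | c
      · simp [matchB]
      · rw [ho] at this
        by_cases hc0 : c = '0'
        · subst hc0; simp_all [matchB]
        · by_cases hc1 : c = '1'
          · subst hc1; simp_all [matchB]
          · simp [matchB, hc0, hc1]
  · rintro ⟨hbad, hmatch⟩ b
    by_cases hb : 8 ≤ b
    · rw [hhigh b hb, (natMM_testBit s b).2]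
      have := hbad b hb
      simp [this]
    · have := hmatch b (by omega)
      rw [(natMM_testBit s b).1, (natMM_testBit s b).2]
      rcases ho : s.reverse[b]? with _ | c
      · simp
      · rw [ho] at this
        have e0 : (c == '0') = false ∨ (c == '1') = false ∨ True := Or.inr (Or.inr trivial)
        by_cases hc0 : c = '0'
        · subst hc0; simp_all [matchB]
        · by_cases hc1 : c = '1'
          · subst hc1; simp_all [matchB]
          · have f0 : (c == '0') = false := by simp [hc0]
            have f1 : (c == '1') = false := by simp [hc1]
            simp [f0, f1]

lemma mem_stepN (c : Option Char) (l : List Nat) (y : Nat) :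
    y ∈ stepN c l ↔ (y / 2 ∈ l ∧ matchB (decide (y % 2 = 1)) c = true) := by
  unfold stepN matchB
  by_cases h0 : c = some '0'
  · rw [if_pos h0, if_pos h0, List.mem_map]
    constructor
    · rintro ⟨x, hx, rfl⟩
      have hx2 : 2 * x / 2 = x := by omega
      rw [hx2]
      exact ⟨hx, by simp⟩
    · rintro ⟨hy, hm⟩
      have hpar : ¬ (y % 2 = 1) := by simpa using hm
      exact ⟨y / 2, hy, by omega⟩
  · rw [if_neg h0, if_neg h0]
    by_cases h1 : c = some '1'
    · rw [if_pos h1, if_pos h1, List.mem_map]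
      constructor
      · rintro ⟨x, hx, rfl⟩
        have hx2 : (2 * x + 1) / 2 = x := by omega
        rw [hx2]
        exact ⟨hx, by simp⟩
      · rintro ⟨hy, hm⟩
        have hpar : y % 2 = 1 := by simpa using hm
        exact ⟨y / 2, hy, by omega⟩
    · rw [if_neg h1, if_neg h1, List.mem_flatMap]
      constructor
      · rintro ⟨x, hx, hy⟩
        simp at hy
        rcases hy with rfl | rfl
        · have hx2 : 2 * x / 2 = x := by omega
          rw [hx2]
          exact ⟨hx, rfl⟩
        · have hx2 : (2 * x + 1) / 2 = x := by omega
          rw [hx2]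
          exact ⟨hx, rfl⟩
      · rintro ⟨hy, _⟩
        refine ⟨y / 2, hy, ?_⟩
        simp
        omega

lemma mem_expN (g : Nat → Option Char) (j : Nat) (hj : j ≤ 8) (y : Nat) :
    y ∈ expN g j ↔ y < 2 ^ j ∧ ∀ t, t < j → matchB (y.testBit t) (g (8 - j + t)) = true := by
  induction j generalizing y with
  | zero =>
    simp only [expN, List.mem_singleton, pow_zero]
    constructor
    · rintro rfl
      exact ⟨by omega, by omega⟩
    · rintro ⟨h1, _⟩
      omega
  | succ j ih =>
    have hj' : j ≤ 8 := by omega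
    rw [expN, mem_stepN, ih hj' (y / 2)]
    have hb0 : y.testBit 0 = decide (y % 2 = 1) := Nat.testBit_zero y
    constructor
    · rintro ⟨⟨hlt, hall⟩, hm⟩
      refine ⟨by rw [pow_succ]; omega, ?_⟩
      intro t ht
      cases t with
      | zero =>
        rw [hb0, show 8 - (j+1) + 0 = 7 - j by omega]
        exact hm
      | succ t =>
        rw [show y.testBit (t+1) = (y/2).testBit t by rw [Nat.testBit_add_one],
            show 8 - (j+1) + (t+1) = 8 - j + t by omega]
        exact hall t (by omega)
    · rintro ⟨hlt, hall⟩
      refine ⟨⟨by rw [pow_succ] at hlt; omega, ?_⟩, ?_⟩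
      · intro t ht
        have := hall (t+1) (by omega)
        rwa [show y.testBit (t+1) = (y/2).testBit t by rw [Nat.testBit_add_one],
             show 8 - (j+1) + (t+1) = 8 - j + t by omega] at this
      · have := hall 0 (by omega)
        rwa [hb0, show 8 - (j+1) + 0 = 7 - j by omega] at this

lemma pairwise_flatMap_two (l : List Nat) (h : l.Pairwise (· < ·)) :
    (l.flatMap (fun x => [2 * x, 2 * x + 1])).Pairwise (· < ·) := by
  induction l with
  | nil => simp
  | cons x t ih =>
    rw [List.pairwise_cons] at h
    rw [List.flatMap_cons, List.pairwise_append]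
    refine ⟨by simp, ih h.2, ?_⟩
    intro a ha b hb
    simp at ha
    rcases List.mem_flatMap.1 hb with ⟨x', hx', hb'⟩
    have hxx : x < x' := h.1 x' hx'
    simp at hb'
    rcases ha with rfl | rfl <;> rcases hb' with rfl | rfl <;> omega

lemma pairwise_stepN (c : Option Char) (l : List Nat) (h : l.Pairwise (· < ·)) :
    (stepN c l).Pairwise (· < ·) := by
  unfold stepN
  split_ifs
  · exact (List.pairwise_map).2 (h.imp (by omega))
  · exact (List.pairwise_map).2 (h.imp (by omega))
  · exact pairwise_flatMap_two l h

lemma pairwise_expN (g : Nat → Option Char) (j : Nat) : (expN g j).Pairwise (· < ·) := by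
  induction j with
  | zero => simp [expN]
  | succ j ih => exact pairwise_stepN _ _ ih

lemma altStep_cast (c : Option Char) (l : List Nat) :
    altStep c (l.map (fun (x : Nat) => (x : Int))) = (stepN c l).map (fun (x : Nat) => (x : Int)) := by
  unfold altStep stepN
  split_ifs
  · induction l with
    | nil => rfl
    | cons x t ih => simp_all
  · induction l with
    | nil => rfl
    | cons x t ih => simp_all
  · induction l with
    | nil => rfl
    | cons x t ih => simp_all

lemma altCharAt_eq (s : List Char) (b : Nat) :
    altCharAt s ((s.length : Int) - 1 - (b : Int)) = s.reverse[b]? := by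
  unfold altCharAt
  by_cases hb : b < s.length
  · rw [if_pos (by constructor <;> omega)]
    have ht : ((s.length : Int) - 1 - (b : Int)).toNat = s.length - 1 - b := by omega
    rw [ht, List.getElem?_reverse hb]
  · rw [if_neg (by omega)]
    symm
    rw [List.getElem?_eq_none_iff]
    simp
    omega

lemma any_iff_bad (s : List Char) :
    ((List.range s.length).any
        (fun i => (s.getD i ' ' == '1') && decide ((8 : Int) ≤ (s.length : Int) - 1 - i))) = true ↔
      ∃ b, 8 ≤ b ∧ s.reverse[b]? = some '1' := by
  rw [List.any_eq_true]
  constructor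
  · rintro ⟨i, hi, hcond⟩
    rw [List.mem_range] at hi
    simp only [Bool.and_eq_true, beq_iff_eq, decide_eq_true_eq] at hcond
    refine ⟨s.length - 1 - i, by omega, ?_⟩
    rw [List.getElem?_reverse (by omega), show s.length - 1 - (s.length - 1 - i) = i by omega]
    rw [List.getElem?_eq_getElem hi]
    rw [List.getD_eq_getElem s ' ' hi] at hcond
    exact congrArg some hcond.1
  · rintro ⟨b, hb8, hbv⟩
    have hb : b < s.length := by
      have hh := (List.getElem?_eq_some_iff.1 hbv).1
      simpa using hh
    refine ⟨s.length - 1 - b, List.mem_range.2 (by omega), ?_⟩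
    simp only [Bool.and_eq_true, beq_iff_eq, decide_eq_true_eq]
    constructor
    · rw [List.getD_eq_getElem s ' ' (by omega : s.length - 1 - b < s.length)]
      rw [List.getElem?_reverse hb, List.getElem?_eq_getElem (by omega : s.length - 1 - b < s.length)] at hbv
      exact Option.some_inj.1 hbv
    · omega

lemma core_eq (myhash : String) : ExpandHashCore myhash = ExpandHashAltCore myhash := by
  unfold ExpandHashCore ExpandHashAltCore
  dsimp only
  set s := myhash.toList with hs
  have hmm : s.foldl maskStepA (0, 0) = (((natMM s).1 : Int), ((natMM s).2 : Int)) := by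
    have := foldA_cast s 0 0
    simpa [natMM] using this
  rw [hmm]
  set M := (natMM s).1 with hM
  set V := (natMM s).2 with hV
  dsimp only
  have hfoldA : (PySem.List.pyRange 0 256 1).foldl
      (fun acc num => if PySem.Int.band num (M : Int) = (V : Int) then acc ++ [num] else acc) [] =
      (PySem.List.pyRange 0 256 1).filter (fun num => decide (PySem.Int.band num (M : Int) = (V : Int))) := by
    have hfun : (fun (acc : List Int) num => if PySem.Int.band num (M : Int) = (V : Int) then acc ++ [num] else acc)
        = (fun acc x => if (fun z => decide (PySem.Int.band z (M : Int) = (V : Int))) x = true then acc ++ [id x] else acc) := by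
      funext acc num
      simp
    rw [hfun, PySem.List.foldl_append_if, List.map_id]
    rfl
  rw [hfoldA]
  have hr : PySem.List.pyRange 0 256 1 = (List.range 256).map (fun (k : Nat) => (k : Int)) := by
    rw [PySem.List.pyRange_one]
    simp
  rw [hr, List.filter_map]
  have hpred : ((fun num => decide (PySem.Int.band num (M : Int) = (V : Int))) ∘ (fun (k : Nat) => (k : Int)))
      = fun (y : Nat) => decide (y &&& M = V) := by
    funext y
    simp [PySem.Int.band_natCast]
  rw [hpred]
  by_cases hbadB : ((List.range s.length).any
      (fun i => (s.getD i ' ' == '1') && decide ((8 : Int) ≤ (s.length : Int) - 1 - i))) = true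
  · rw [if_pos hbadB]
    obtain ⟨b, hb8, hb1⟩ := (any_iff_bad s).1 hbadB
    have hfalse : ∀ y ∈ List.range 256, ¬ ((fun y => decide (y &&& M = V)) y = true) := by
      intro y hy hcon
      rw [List.mem_range] at hy
      rw [decide_eq_true_eq] at hcon
      exact ((predA_iff s y hy).1 hcon).1 b hb8 hb1
    rw [List.filter_eq_nil_iff.2 hfalse]
    rfl
  · rw [if_neg hbadB]
    have hnobad : ∀ b, 8 ≤ b → s.reverse[b]? ≠ some '1' := by
      intro b hb hc
      exact hbadB ((any_iff_bad s).2 ⟨b, hb, hc⟩)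
    have hrange7 : PySem.List.pyRange 7 (-1) (-1) = [7, 6, 5, 4, 3, 2, 1, 0] := by decide
    rw [hrange7]
    simp only [List.foldl_cons, List.foldl_nil]
    have hc : ∀ (bi : Int) (b : Nat), bi = (b : Int) →
        altCharAt s ((s.length : Int) - 1 - bi) = s.reverse[b]? := by
      intro bi b hbi
      rw [hbi]
      exact altCharAt_eq s b
    rw [hc 7 7 (by norm_num), hc 6 6 (by norm_num), hc 5 5 (by norm_num), hc 4 4 (by norm_num),
        hc 3 3 (by norm_num), hc 2 2 (by norm_num), hc 1 1 (by norm_num), hc 0 0 (by norm_num)]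
    set g : Nat → Option Char := fun b => s.reverse[b]? with hg
    have h0l : ([(0 : Int)]) = ([0] : List Nat).map (fun (x : Nat) => (x : Int)) := by norm_num
    rw [h0l, altStep_cast, altStep_cast, altStep_cast, altStep_cast, altStep_cast, altStep_cast,
        altStep_cast, altStep_cast]
    have hexp : stepN (g 0) (stepN (g 1) (stepN (g 2) (stepN (g 3) (stepN (g 4) (stepN (g 5)
        (stepN (g 6) (stepN (g 7) [0]))))))) = expN g 8 := by
      simp [expN]
    rw [hexp]
    apply congrArg
    -- the two Nat lists are strictly increasing with the same members
    have hmemA : ∀ y, y ∈ (List.range 256).filter (fun y => decide (y &&& M = V)) ↔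
        (y < 256 ∧ ∀ t, t < 8 → matchB (y.testBit t) (g t) = true) := by
      intro y
      rw [List.mem_filter, List.mem_range, decide_eq_true_eq]
      constructor
      · rintro ⟨hy, hp⟩
        exact ⟨hy, ((predA_iff s y hy).1 hp).2⟩
      · rintro ⟨hy, hp⟩
        exact ⟨hy, (predA_iff s y hy).2 ⟨hnobad, hp⟩⟩
    have hmemB : ∀ y, y ∈ expN g 8 ↔
        (y < 256 ∧ ∀ t, t < 8 → matchB (y.testBit t) (g t) = true) := by
      intro y
      rw [mem_expN g 8 le_rfl y]
      constructor
      · rintro ⟨hy, hp⟩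
        exact ⟨by norm_num at hy; exact hy, fun t ht => by simpa using hp t ht⟩
      · rintro ⟨hy, hp⟩
        exact ⟨by norm_num; exact hy, fun t ht => by simpa using hp t ht⟩
    have ndA : ((List.range 256).filter (fun y => decide (y &&& M = V))).Nodup :=
      List.Nodup.filter _ (List.nodup_range)
    have ndB : (expN g 8).Nodup := (pairwise_expN g 8).imp (fun h => ne_of_lt h)
    have hperm : ((List.range 256).filter (fun y => decide (y &&& M = V))).Perm (expN g 8) :=
      (List.perm_ext_iff_of_nodup ndA ndB).2 (fun y => (hmemA y).trans (hmemB y).symm)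
    have sA : ((List.range 256).filter (fun y => decide (y &&& M = V))).Pairwise (· ≤ ·) :=
      ((List.pairwise_lt_range).sublist (List.filter_sublist)).imp le_of_lt
    have sB : (expN g 8).Pairwise (· ≤ ·) := (pairwise_expN g 8).imp le_of_lt
    exact hperm.eq_of_pairwise (fun a b _ _ h1 h2 => le_antisymm h1 h2) sA sB

-- ===== VERDICT (by name: the statement is the Claim_ definition above) =====
theorem ExpandHash_spec : Claim_equal_ExpandHash := by
  intro myhash hash_tmp _
  show ExpandHash myhash hash_tmp = ExpandHash_alt myhash hash_tmp
  unfold ExpandHash ExpandHash_alt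
  by_cases hsp : PySem.Str.isIn " " myhash = true
  · rw [if_pos hsp, if_pos hsp]
  · rw [if_neg hsp, if_neg hsp]
    cases hash_tmp with
    | none => exact core_eq myhash
    | some d =>
      dsimp only
      by_cases hd : d.isEmpty = true
      · rw [if_pos hd, if_pos hd]; exact core_eq myhash
      · rw [if_neg hd, if_neg hd]
        cases List.lookup myhash d with
        | none => exact core_eq myhash
        | some v => rfl
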